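-- pv_equiv track=rewrite | github.com/redjokerv1-cmd/OmniTab | evaluate_optimized.py | compare_beat
-- ===== SOURCE A (Python) =====
-- def compare_beat(gt_beat: dict, pred_beat: dict) -> dict:
--     gt_notes = {(n["s"], n["f"]) for n in gt_beat.get("notes", [])}
--     pred_notes = set()
--
--     for n in pred_beat.get("notes", []):
--         s = n.get("string")
--         f = n.get("fret")
--         if s and f is not None:
--             pred_notes.add((s, f))
--
--     correct = gt_notes & pred_notes
--     missing = gt_notes - pred_notes
--     extra = pred_notes - gt_notes
--
--     return {
--         "correct": len(correct),
--         "missing": len(missing),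
--         "extra": len(extra),
--         "gt_count": len(gt_notes),
--     }
-- ===== SOURCE B (Python) =====
-- def compare_beat(gt_beat: dict, pred_beat: dict) -> dict:
--     gt_notes = {(n["s"], n["f"]) for n in gt_beat.get("notes", [])}
--     pred_notes = set()
--     for n in pred_beat.get("notes", []):
--         s = n.get("string")
--         f = n.get("fret")
--         if s and f is not None:
--             pred_notes.add((s, f))
--     # sort both note sets and count the matches with a two-pointer merge
--     gs = sorted(gt_notes)
--     ps = sorted(pred_notes)
--     i = j = correct = 0
--     while i < len(gs) and j < len(ps):
--         if gs[i] == ps[j]: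
--             correct += 1
--             i += 1
--             j += 1
--         elif gs[i] < ps[j]:
--             i += 1
--         else:
--             j += 1
--     g = len(gs)
--     p = len(ps)
--     return {
--         "correct": correct,
--         "missing": g - correct,
--         "extra": p - correct,
--         "gt_count": g,
--     }
-- ===== Notes on version B (the rewrite author's own statement) =====
-- stated objective: alternative
-- what changed: B replaces A's hash-set intersection/difference operations by sorting both note sets and counting matches with a two-pointer merge, deriving missing/extra/gt_count arithmetically from the two lengths and the match count.
import Mathlib
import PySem

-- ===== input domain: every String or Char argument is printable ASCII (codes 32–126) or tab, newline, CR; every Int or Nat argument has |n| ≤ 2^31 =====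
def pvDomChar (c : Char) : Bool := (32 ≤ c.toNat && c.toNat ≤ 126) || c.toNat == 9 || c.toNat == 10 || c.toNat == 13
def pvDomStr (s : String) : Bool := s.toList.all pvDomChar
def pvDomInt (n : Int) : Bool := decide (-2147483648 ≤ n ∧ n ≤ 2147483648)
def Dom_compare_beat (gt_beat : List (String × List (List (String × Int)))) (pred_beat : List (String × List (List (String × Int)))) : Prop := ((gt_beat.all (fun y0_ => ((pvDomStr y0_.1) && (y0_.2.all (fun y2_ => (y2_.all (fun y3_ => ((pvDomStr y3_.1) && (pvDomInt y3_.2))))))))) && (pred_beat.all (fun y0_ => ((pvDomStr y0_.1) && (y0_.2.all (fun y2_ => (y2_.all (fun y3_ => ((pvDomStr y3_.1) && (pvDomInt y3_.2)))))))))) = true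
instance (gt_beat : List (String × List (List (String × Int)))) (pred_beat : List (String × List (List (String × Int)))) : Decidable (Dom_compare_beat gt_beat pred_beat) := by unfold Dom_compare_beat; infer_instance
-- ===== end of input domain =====

-- B sorts both note sets and counts matches with a two-pointer merge instead of A's hash-set
-- intersection/differences, deriving missing/extra/gt_count from the lengths (objective: alternative).

-- ===== PORT A =====
-- shared note-set construction: both Pythons build gt_notes / pred_notes with identical code
-- gt_notes = {(n["s"], n["f"]) for n in gt_beat.get("notes", [])}; n["s"]/n["f"] KeyError excluded by Pre_
def pvGtNotes (gt_beat : List (String × List (List (String × Int)))) : PySem.Set (Int × Int) :=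
  (PySem.Dict.getD (⟨gt_beat⟩ : PySem.Dict String (List (List (String × Int)))) "notes" []).foldl
    (fun s n =>
      match PySem.Dict.get? (⟨n⟩ : PySem.Dict String Int) "s", PySem.Dict.get? (⟨n⟩ : PySem.Dict String Int) "f" with
      | some a, some b => PySem.Set.add s (a, b)
      | _, _ => s)  -- Python raises KeyError here; unreachable under Pre_compare_beat
    PySem.Set.empty

-- the pred loop: s = n.get("string"); f = n.get("fret"); if s and f is not None: add (s, f)
def pvPredNotes (pred_beat : List (String × List (List (String × Int)))) : PySem.Set (Int × Int) :=
  (PySem.Dict.getD (⟨pred_beat⟩ : PySem.Dict String (List (List (String × Int)))) "notes" []).foldl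
    (fun s n =>
      match PySem.Dict.get? (⟨n⟩ : PySem.Dict String Int) "string", PySem.Dict.get? (⟨n⟩ : PySem.Dict String Int) "fret" with
      | some sv, some fv => if sv ≠ 0 then PySem.Set.add s (sv, fv) else s  -- int truthiness of s
      | _, _ => s)
    PySem.Set.empty

def compare_beat (gt_beat : List (String × List (List (String × Int)))) (pred_beat : List (String × List (List (String × Int)))) : List (String × Int) :=
  let gt_notes := pvGtNotes gt_beat
  let pred_notes := pvPredNotes pred_beat
  let correct := PySem.Set.inter gt_notes pred_notes
  let missing := PySem.Set.diff gt_notes pred_notes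
  let extra := PySem.Set.diff pred_notes gt_notes
  [("correct", (correct.length : Int)), ("missing", (missing.length : Int)),
   ("extra", (extra.length : Int)), ("gt_count", (gt_notes.length : Int))]

-- ===== PORT B =====
-- Python's `<` on int pairs is the lexicographic order; exact for (Int × Int)
def pvTupLt (x y : Int × Int) : Bool := decide (x.1 < y.1) || (decide (x.1 = y.1) && decide (x.2 < y.2))

-- the while loop `while i < len(gs) and j < len(ps): …` ported as recursion on the remaining
-- suffixes gs[i:], ps[j:] (each branch advances i and/or j, i.e. drops a head); exact
def pvMergeCount : List (Int × Int) → List (Int × Int) → Int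
  | [], _ => 0
  | _ :: _, [] => 0
  | x :: as, y :: bs =>
    if x = y then pvMergeCount as bs + 1
    else if pvTupLt x y then pvMergeCount as (y :: bs)
    else pvMergeCount (x :: as) bs
termination_by a b => a.length + b.length

def compare_beat_alt (gt_beat : List (String × List (List (String × Int)))) (pred_beat : List (String × List (List (String × Int)))) : List (String × Int) :=
  let gt_notes := pvGtNotes gt_beat
  let pred_notes := pvPredNotes pred_beat
  let gs := PySem.List.sorted2 gt_notes Prod.fst Prod.snd       -- sorted(gt_notes), tuple (lex) order
  let ps := PySem.List.sorted2 pred_notes Prod.fst Prod.snd     -- sorted(pred_notes)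
  let correct := pvMergeCount gs ps
  let g := (gs.length : Int)
  let p := (ps.length : Int)
  [("correct", correct), ("missing", g - correct),
   ("extra", p - correct), ("gt_count", g)]

-- ===== PRECONDITION & SPEC =====
-- Pre_ excludes inputs where a gt note dict lacks key "s" or "f": there Python A (and B) raise KeyError.
def Pre_compare_beat (gt_beat : List (String × List (List (String × Int)))) (pred_beat : List (String × List (List (String × Int)))) : Prop :=
  ∀ n ∈ PySem.Dict.getD (⟨gt_beat⟩ : PySem.Dict String (List (List (String × Int)))) "notes" [],
    (PySem.Dict.get? (⟨n⟩ : PySem.Dict String Int) "s").isSome = true ∧ (PySem.Dict.get? (⟨n⟩ : PySem.Dict String Int) "f").isSome = true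
instance (gt_beat : List (String × List (List (String × Int)))) (pred_beat : List (String × List (List (String × Int)))) : Decidable (Pre_compare_beat gt_beat pred_beat) := by unfold Pre_compare_beat; infer_instance
def pvWitness_compare_beat : (List (String × List (List (String × Int)))) × (List (String × List (List (String × Int)))) :=
  ([("notes", [[("s", 1), ("f", 2)]])], [("notes", [[("string", 1), ("fret", 2)], [("string", 0), ("fret", 3)]])])

def Spec_compare_beat (gt_beat : List (String × List (List (String × Int)))) (pred_beat : List (String × List (List (String × Int)))) (out : List (String × Int)) : Prop := out = compare_beat_alt gt_beat pred_beat
instance (gt_beat : List (String × List (List (String × Int)))) (pred_beat : List (String × List (List (String × Int)))) (out : List (String × Int)) : Decidable (Spec_compare_beat gt_beat pred_beat out) := by unfold Spec_compare_beat; infer_instance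

-- ===== CLAIM (what is proved, stated in full; the proofs are below) =====
def Claim_equal_compare_beat : Prop := ∀ (gt_beat : List (String × List (List (String × Int)))) (pred_beat : List (String × List (List (String × Int)))), Dom_compare_beat gt_beat pred_beat → Pre_compare_beat gt_beat pred_beat → Spec_compare_beat gt_beat pred_beat (compare_beat gt_beat pred_beat)

-- ===== LEMMAS AND PROOFS =====

-- strict lexicographic order on Int pairs, as a Prop
def pvLt (x y : Int × Int) : Prop := x.1 < y.1 ∨ (x.1 = y.1 ∧ x.2 < y.2)

lemma pvTupLt_iff (x y : Int × Int) : pvTupLt x y = true ↔ pvLt x y := by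
  simp [pvTupLt, pvLt]

lemma pvLt_irrefl (x : Int × Int) : ¬ pvLt x x := by simp [pvLt]

lemma pvLt_trans {x y z : Int × Int} (h1 : pvLt x y) (h2 : pvLt y z) : pvLt x z := by
  rcases x with ⟨a, b⟩; rcases y with ⟨c, d⟩; rcases z with ⟨e, f⟩
  simp only [pvLt] at *
  omega

lemma pvLt_total {x y : Int × Int} (hne : x ≠ y) : pvLt x y ∨ pvLt y x := by
  rcases x with ⟨a, b⟩; rcases y with ⟨c, d⟩
  have h : ¬ (a = c ∧ b = d) := by simpa [Prod.ext_iff] using hne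
  simp only [pvLt]
  omega

lemma pvLt_asymm {x y : Int × Int} (h : pvLt x y) : ¬ pvLt y x := by
  intro h2; exact pvLt_irrefl x (pvLt_trans h h2)

lemma pvNodup_fold {α β : Type} [BEq α] [LawfulBEq α] (f : PySem.Set α → β → PySem.Set α)
    (hf : ∀ s b, s.Nodup → (f s b).Nodup) :
    ∀ (l : List β) (s : PySem.Set α), s.Nodup → (l.foldl f s).Nodup := by
  intro l
  induction l with
  | nil => intro s hs; simpa using hs
  | cons b l ih => intro s hs; exact ih _ (hf _ _ hs)

lemma pvGtNotes_nodup (gt_beat : List (String × List (List (String × Int)))) :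
    (pvGtNotes gt_beat).Nodup := by
  unfold pvGtNotes
  apply pvNodup_fold
  · intro s n hs
    rcases PySem.Dict.get? (⟨n⟩ : PySem.Dict String Int) "s" with _ | a <;> rcases PySem.Dict.get? (⟨n⟩ : PySem.Dict String Int) "f" with _ | b <;>
      simp_all [PySem.Set.nodup_add]
  · exact List.nodup_nil

lemma pvPredNotes_nodup (pred_beat : List (String × List (List (String × Int)))) :
    (pvPredNotes pred_beat).Nodup := by
  unfold pvPredNotes
  apply pvNodup_fold
  · intro s n hs
    rcases PySem.Dict.get? (⟨n⟩ : PySem.Dict String Int) "string" with _ | a <;> rcases PySem.Dict.get? (⟨n⟩ : PySem.Dict String Int) "fret" with _ | b <;>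
      first
        | simpa using hs
        | (dsimp only; split <;> [exact PySem.Set.nodup_add _ _ hs; exact hs])
  · exact List.nodup_nil

-- insertBy with the lex `before` keeps the list nondecreasing (¬ pvLt b a between any two in order)
lemma pvInsertBy_pairwise (x : Int × Int) (l : List (Int × Int))
    (hl : l.Pairwise (fun a b => ¬ pvLt b a)) :
    (PySem.List.insertBy pvTupLt x l).Pairwise (fun a b => ¬ pvLt b a) := by
  induction l with
  | nil => simp [PySem.List.insertBy]
  | cons y ys ih =>
    rcases hl with _ | ⟨hy, hys⟩
    by_cases h : pvTupLt x y = true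
    · have hxy : pvLt x y := (pvTupLt_iff x y).1 h
      rw [PySem.List.insertBy, if_pos h]
      refine List.Pairwise.cons ?_ (List.Pairwise.cons hy hys)
      intro z hz
      rcases List.mem_cons.1 hz with rfl | hz
      · exact pvLt_asymm hxy
      · intro hzx
        exact hy z hz (pvLt_trans hzx hxy)
    · rw [PySem.List.insertBy, if_neg h]
      refine List.Pairwise.cons ?_ (ih hys)
      intro z hz
      rcases (PySem.List.mem_insertBy _ _ _ _).1 hz with rfl | hz
      · intro hzy
        exact h ((pvTupLt_iff z y).2 hzy)
      · exact hy z hz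


lemma pvSorted2_pairwise (xs : List (Int × Int)) :
    (PySem.List.sorted2 xs Prod.fst Prod.snd).Pairwise (fun a b => ¬ pvLt b a) := by
  have heq : PySem.List.sorted2 xs Prod.fst Prod.snd
      = xs.foldl (fun acc x => PySem.List.insertBy pvTupLt x acc) [] := by
    unfold PySem.List.sorted2 pvTupLt
    simp only [if_neg (by decide : ¬ (false = true))]
    congr 1
    funext acc x
    congr 1
    funext a b
    rcases a with ⟨a1, a2⟩; rcases b with ⟨b1, b2⟩
    by_cases h1 : a1 < b1 <;> by_cases h2 : b1 < a1 <;> by_cases h3 : a2 < b2 <;>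
      simp [h1, h2, h3] <;> omega
  rw [heq]
  have : ∀ (l : List (Int × Int)) (acc : List (Int × Int)),
      acc.Pairwise (fun a b => ¬ pvLt b a) →
      (l.foldl (fun acc x => PySem.List.insertBy pvTupLt x acc) acc).Pairwise (fun a b => ¬ pvLt b a) := by
    intro l
    induction l with
    | nil => intro acc h; simpa using h
    | cons x l ih => intro acc h; exact ih _ (pvInsertBy_pairwise x acc h)
  exact this xs [] (by simp)

-- a nondecreasing Nodup list is strictly increasing
lemma pvSorted2_pairwise_lt (xs : List (Int × Int)) (hx : xs.Nodup) :
    (PySem.List.sorted2 xs Prod.fst Prod.snd).Pairwise pvLt := by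
  have hnd : (PySem.List.sorted2 xs Prod.fst Prod.snd).Nodup :=
    (PySem.List.sorted2_perm xs Prod.fst Prod.snd false).nodup_iff.2 hx
  have hle := pvSorted2_pairwise xs
  refine (hle.and hnd).imp ?_
  rintro a b ⟨hba, hne⟩
  rcases pvLt_total hne with h | h
  · exact h
  · exact absurd h hba

-- merge count on strictly increasing lists = size of the intersection (filter of the first by the second)
lemma pvMergeCount_eq (a b : List (Int × Int)) (ha : a.Pairwise pvLt) (hb : b.Pairwise pvLt) :
    pvMergeCount a b = ((a.filter (fun x => b.contains x)).length : Int) := by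
  induction a, b using pvMergeCount.induct with
  | case1 b => simp [pvMergeCount]
  | case2 x as => simp [pvMergeCount]
  | case3 as y bs ih =>
    rcases ha with _ | ⟨hx, has⟩
    rcases hb with _ | ⟨hy, hbs⟩
    have hfc : as.filter (fun z => (y :: bs).contains z) = as.filter (fun z => bs.contains z) :=
      List.filter_congr (fun z hz => by
        have hne : z ≠ y := fun h => pvLt_irrefl y (by have := hx z hz; rw [h] at this; exact this)
        simp [hne])
    rw [pvMergeCount, if_pos rfl, List.filter_cons_of_pos (by simp), hfc, ih has hbs,
      List.length_cons]
    push_cast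
    ring
  | case4 x as y bs hne hlt ih =>
    rcases ha with _ | ⟨hx, has⟩
    rcases hb with _ | ⟨hy, hbs⟩
    have hxy : pvLt x y := (pvTupLt_iff x y).1 hlt
    have hxbs : x ∉ bs := fun hm => pvLt_irrefl x (pvLt_trans hxy (hy x hm))
    rw [pvMergeCount, if_neg hne, if_pos hlt]
    rw [ih has (List.Pairwise.cons hy hbs)]
    simp [hne, hxbs]
  | case5 x as y bs hne hnlt ih =>
    rcases hb with _ | ⟨hy, hbs⟩
    have hyx : pvLt y x := by
      rcases pvLt_total (fun h => hne h) with h | h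
      · exact absurd ((pvTupLt_iff x y).2 h) (by simpa using hnlt)
      · exact h
    rw [pvMergeCount, if_neg hne, if_neg hnlt]
    have hfc : (x :: as).filter (fun z => (y :: bs).contains z)
        = (x :: as).filter (fun z => bs.contains z) :=
      List.filter_congr (fun z hz => by
        have hzy : z ≠ y := by
          rcases List.mem_cons.1 hz with rfl | hz
          · exact fun h => hne h
          · rcases ha with _ | ⟨hx, has⟩
            exact fun h => by subst h; exact pvLt_irrefl z (pvLt_trans hyx (hx z hz))
        simp [hzy])
    rw [ih ha hbs, hfc]


-- lengths transfer along the sorting permutation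
lemma pvFilter_contains_perm {l l' t t' : List (Int × Int)} (hl : l.Perm l') (ht : ∀ z, t.contains z = t'.contains z) :
    (l.filter (fun x => t.contains x)).length = (l'.filter (fun x => t'.contains x)).length := by
  have h1 : l.filter (fun x => t.contains x) = l.filter (fun x => t'.contains x) :=
    List.filter_congr (fun z _ => ht z)
  rw [h1]
  exact (hl.filter _).length_eq

-- |{a ∈ s : ¬ p a}| = |s| - |{a ∈ s : p a}|
lemma pvFilter_not_length {α : Type} (p : α → Bool) (s : List α) :
    (s.filter (fun a => !p a)).length = s.length - (s.filter p).length := by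
  induction s with
  | nil => simp
  | cons x s ih =>
    have hle : (s.filter p).length ≤ s.length := List.length_filter_le _ _
    cases h : p x <;> simp [h] <;> omega

-- ===== VERDICT (by name: the statement is the Claim_ definition above) =====
theorem compare_beat_spec : Claim_equal_compare_beat := by
  intro gt_beat pred_beat _hdom _hpre
  unfold Spec_compare_beat compare_beat compare_beat_alt
  have hg := pvGtNotes_nodup gt_beat
  have hp := pvPredNotes_nodup pred_beat
  set G := pvGtNotes gt_beat with hG
  set P := pvPredNotes pred_beat with hP
  have hgs : (PySem.List.sorted2 G Prod.fst Prod.snd).Perm G := PySem.List.sorted2_perm _ _ _ _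
  have hps : (PySem.List.sorted2 P Prod.fst Prod.snd).Perm P := PySem.List.sorted2_perm _ _ _ _
  have hcontains : ∀ z, List.contains (PySem.List.sorted2 P Prod.fst Prod.snd) z = List.contains P z :=
    fun z => Bool.eq_iff_iff.2 (by rw [List.contains_iff_mem, List.contains_iff_mem]; exact hps.mem_iff)
  have hmerge : pvMergeCount (PySem.List.sorted2 G Prod.fst Prod.snd) (PySem.List.sorted2 P Prod.fst Prod.snd)
      = ((G.filter (List.contains P)).length : Int) := by
    rw [pvMergeCount_eq _ _ (pvSorted2_pairwise_lt G hg) (pvSorted2_pairwise_lt P hp)]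
    exact congrArg Nat.cast (pvFilter_contains_perm hgs hcontains)
  have hginter : PySem.Set.inter G P = G.filter (List.contains P) := rfl
  have hgdiff : PySem.Set.diff G P = G.filter (fun x => !(List.contains P x)) := rfl
  have hpdiff : PySem.Set.diff P G = P.filter (fun x => !(List.contains G x)) := rfl
  have hglen : (PySem.List.sorted2 G Prod.fst Prod.snd).length = G.length := hgs.length_eq
  have hplen : (PySem.List.sorted2 P Prod.fst Prod.snd).length = P.length := hps.length_eq
  have hswap : (P.filter (List.contains G)).length = (G.filter (List.contains P)).length := by
    have h : ∀ (u v : List (Int × Int)), (u.filter (fun a => v.contains a)).toFinset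
        = u.toFinset ∩ v.toFinset := by
      intro u v
      ext a
      simp
    rw [← List.toFinset_card_of_nodup (hp.filter _), ← List.toFinset_card_of_nodup (hg.filter _),
      h P G, h G P, Finset.inter_comm]
  have h1 : (G.filter (List.contains P)).length ≤ G.length := List.length_filter_le _ _
  have h2 : (P.filter (List.contains G)).length ≤ P.length := List.length_filter_le _ _
  simp only [hginter, hgdiff, hpdiff, hmerge, hglen, hplen, pvFilter_not_length,
    List.cons.injEq, Prod.mk.injEq, and_true, true_and]
  omega
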